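-- pv_equiv track=rewrite | github.com/vadimpechenin/SummerfieldProgrammingPython3 | Chapter8/main/src/structural/recursion/main.py | indented_list_sort
-- ===== SOURCE A (Python) =====
-- def indented_list_sort(indented_list, indent="    "):
--    """Returns an alphabetically sorted copy of the given list
--
--    The indented list is assumed to be a list of strings in a
--    hierarchy with indentation used to indicate child items.
--    The indent parameter specifies the characters that constitute
--    one level of indent.
--
--    The function copies the list, and returns it sorted in
--    case-insensitive alphabetical order, with child items sorted
--    underneath their parent items, and so on with grandchild items,
--    and so on recursively to any level of depth.
--
--    >>> indented_list = ["M", " MX", " MG", "D", " DA", " DF",\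
--    "  DFX", "  DFK", "  DFB", " DC", "K", "X", "H", " HJ",\
--    " HB", "A"]
--    >>>
--    >>> indented_list = indented_list_sort(indented_list, " ")
--    >>> indented_list[:8]
--    ['A', 'D', ' DA', ' DC', ' DF', '  DFB', '  DFK', '  DFX']
--    >>> indented_list[8:]
--    ['H', ' HB', ' HJ', 'K', 'M', ' MG', ' MX', 'X']
--    """
--    KEY, ITEM, CHILDREN = range(3)
--
--    def add_entry(level, key, item, children):
--       if level == 0:
--          children.append((key, item, []))
--       else:
--          add_entry(level - 1, key, item, children[-1][CHILDREN])
--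
--    def update_indented_list(entry):
--       indented_list.append(entry[ITEM])
--       for subentry in sorted(entry[CHILDREN]):
--          update_indented_list(subentry)
--
--    entries = []
--    for item in indented_list:
--       level = 0
--       i = 0
--       while item.startswith(indent, i):
--          i += len(indent)
--          level += 1
--       key = item.strip().lower()
--       add_entry(level, key, item, entries)
--
--    indented_list = []
--    for entry in sorted(entries):
--       update_indented_list(entry)
--    return indented_list
-- ===== SOURCE B (Python) =====
-- def indented_list_sort(indented_list, indent="    "):
--     """Iterative rebuild: a stack of open children-lists replaces A's
--     recursive descent to the insertion point; output phase as in A."""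
--     entries = []
--     stack = [entries]            # stack[d+1] is the children list of the open node at depth d
--     for item in indented_list:
--         level = 0
--         rest = item
--         while indent and rest.startswith(indent):
--             rest = rest[len(indent):]
--             level += 1
--         node = (item.strip().lower(), item, [])
--         del stack[level + 1:]
--         stack[level].append(node)
--         stack.append(node[2])
--     result = []
--     def walk(entry):
--         result.append(entry[1])
--         for sub in sorted(entry[2]):
--             walk(sub)
--     for entry in sorted(entries):
--         walk(entry)
--     return result
-- ===== Notes on version B (the rewrite author's own statement) =====
-- stated objective: alternative
-- what changed: A inserts each line by recursing down to the last child's children list level times (add_entry); B builds the same (key, item, children) tree in one iterative pass keeping a stack of the open children-lists along the rightmost path (truncate stack to the line's level, append, push); the sorted()+DFS output phase is unchanged.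
import Mathlib
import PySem

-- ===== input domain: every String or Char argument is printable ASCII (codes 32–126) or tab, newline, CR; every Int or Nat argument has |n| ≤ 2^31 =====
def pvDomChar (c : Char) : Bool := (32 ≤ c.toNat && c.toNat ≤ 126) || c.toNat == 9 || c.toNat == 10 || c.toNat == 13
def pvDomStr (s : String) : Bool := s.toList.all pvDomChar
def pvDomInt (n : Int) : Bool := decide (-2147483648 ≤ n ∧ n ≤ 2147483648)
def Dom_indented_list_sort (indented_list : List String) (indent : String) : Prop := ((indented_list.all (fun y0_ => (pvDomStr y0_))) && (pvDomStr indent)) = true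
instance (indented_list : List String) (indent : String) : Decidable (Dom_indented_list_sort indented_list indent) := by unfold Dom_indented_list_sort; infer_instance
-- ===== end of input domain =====

-- B replaces A's recursive descent to the insertion point (add_entry) by an iterative
-- builder keeping a stack of the open children-lists along the rightmost path; the
-- sorting/output phase is the same in both Pythons.  Equivalence of RETURN values only
-- (neither Python mutates its arguments).

-- ===== SHARED STRUCTURE (both Pythons build the same (key, item, children) trees and
-- run the identical sorted()+DFS output phase; these helpers port that common code) =====

mutual
/-- a Python entry tuple `(key, item, children)`; strings kept as `List Char` -/
inductive Node where
  | mk : List Char → List Char → NodeList → Node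
/-- a Python list of entry tuples (explicit child-list type: no nested inductive) -/
inductive NodeList where
  | nil : NodeList
  | cons : Node → NodeList → NodeList
end

def NodeList.snoc : NodeList → Node → NodeList
  | .nil, n => .cons n .nil
  | .cons m rest, n => .cons m (rest.snoc n)

def ofList : List Node → NodeList := fun l => l.foldr .cons .nil

def nlNodes : NodeList → List Node
  | .nil => []
  | .cons n r => n :: nlNodes r

mutual
def nodeSize : Node → Nat
  | .mk _ _ ch => 1 + nlSize ch
def nlSize : NodeList → Nat
  | .nil => 0
  | .cons n r => nodeSize n + nlSize r
end

def listSize (ns : List Node) : Nat := (ns.map nodeSize).sum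

mutual
/-- three-way comparison realising Python's `<`/`==` on the `(key, item, children)` tuples -/
def nodeCmp : Node → Node → Ordering
  | .mk k1 i1 c1, .mk k2 i2 c2 =>
    match compare k1 k2 with
    | .eq => match compare i1 i2 with
             | .eq => nlCmp c1 c2
             | o => o
    | o => o
/-- lexicographic comparison of lists of entry tuples -/
def nlCmp : NodeList → NodeList → Ordering
  | .nil, .nil => .eq
  | .nil, .cons _ _ => .lt
  | .cons _ _, .nil => .gt
  | .cons a as, .cons b bs =>
    match nodeCmp a b with
    | .eq => nlCmp as bs
    | o => o
end

/-- Python `<` on the `(key, item, children)` tuples -/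
def nodeLt (a b : Node) : Bool := nodeCmp a b == .lt

/-- Python `sorted(entries)`: the stable insertion sort `PySem.List.sorted` is exactly this
    foldl/insertBy shape (`PySem.List.sorted_eq_foldl_insertBy`), here with `before` = the
    tuple `<` of the elements themselves. -/
def sortNodes (ns : List Node) : List Node :=
  ns.foldl (fun acc x => PySem.List.insertBy nodeLt x acc) []

lemma insertBy_perm (p : Node → Node → Bool) (x : Node) :
    ∀ ys : List Node, (PySem.List.insertBy p x ys).Perm (x :: ys) := by
  intro ys
  induction ys with
  | nil => simp [PySem.List.insertBy]
  | cons y ys ih =>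
    simp only [PySem.List.insertBy]
    split
    · exact List.Perm.refl _
    · exact (List.Perm.cons y ih).trans (List.Perm.swap x y ys)

lemma sortNodes_perm_aux (ns : List Node) : ∀ acc : List Node,
    (ns.foldl (fun acc x => PySem.List.insertBy nodeLt x acc) acc).Perm (acc ++ ns) := by
  induction ns with
  | nil => simp
  | cons x ns ih =>
    intro acc
    simp only [List.foldl_cons]
    refine (ih _).trans ?_
    refine (List.Perm.append_right ns (insertBy_perm nodeLt x acc)).trans ?_
    exact List.perm_middle.symm

lemma listSize_sortNodes (ns : List Node) : listSize (sortNodes ns) = listSize ns := by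
  have h : (sortNodes ns).Perm ns := by simpa using sortNodes_perm_aux ns []
  exact (h.map nodeSize).sum_eq

lemma listSize_toList (ch : NodeList) : listSize (nlNodes ch) = nlSize ch := by
  induction ch using nlNodes.induct with
  | case1 => rfl
  | case2 n r ih =>
    simp [nlNodes, listSize, nlSize] at *
    omega

lemma nodeSize_pos (n : Node) : 0 < nodeSize n := by
  cases n; simp [nodeSize]

/-- the common output phase: `update_indented_list` over a list of entries
    (`update(e) = [e.item] ++ concat(update over sorted children)`) -/
def emitAll : List Node → List (List Char)
  | [] => []
  | .mk _k it ch :: rest => it :: (emitAll (sortNodes (nlNodes ch)) ++ emitAll rest)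
termination_by ns => listSize ns
decreasing_by
  · have h1 := listSize_sortNodes (nlNodes ch)
    have h2 := listSize_toList ch
    simp only [listSize, List.map_cons, List.sum_cons, nodeSize] at *
    omega
  · have := nodeSize_pos (Node.mk _k it ch)
    simp only [listSize, List.map_cons, List.sum_cons]
    omega

-- ===== PORT A =====

/-- A's indent-counting while loop: `while item.startswith(indent, i): i += len(indent); level += 1`
    (the `ind ≠ []` guard only makes the loop total: Python diverges for `indent == ""`,
    which `Pre_` excludes) -/
def levelA (s ind : List Char) (i level : Nat) : Nat :=
  if h : ind ≠ [] ∧ PySem.Chars.startswith (s.drop i) ind = true then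
    levelA s ind (i + ind.length) (level + 1)
  else level
termination_by s.length - i
decreasing_by
  have hp := (PySem.Chars.startswith_iff _ _).mp h.2
  have h1 := hp.length_le
  have h2 : ind.length ≠ 0 := by simpa using h.1
  simp [List.length_drop] at h1
  omega

/-- A's recursive `add_entry(level, key, item, children)`: descend into the LAST entry's
    children `level` times, then append; `none` = Python's IndexError on an empty
    children list (excluded by `Pre_`). -/
def addEntry : Nat → List Char → List Char → NodeList → Option NodeList
  | 0, k, it, ch => some (ch.snoc (.mk k it .nil))
  | _ + 1, _, _, .nil => none
  | l + 1, k, it, .cons (.mk k' it' ch') .nil =>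
    (addEntry l k it ch').map (fun c => .cons (.mk k' it' c) .nil)
  | l + 1, k, it, .cons n (.cons m rest) =>
    (addEntry (l + 1) k it (.cons m rest)).map (.cons n)
termination_by l _ _ ch => (l, nlSize ch)
decreasing_by
  · exact Prod.Lex.left _ _ (Nat.lt_succ_self l)
  · exact Prod.Lex.right _ (by have := nodeSize_pos n; simp [nlSize]; omega)

/-- A's first loop: `for item in indented_list: … add_entry(level, key, item, entries)` -/
def buildA (ind : List Char) : List String → NodeList → Option NodeList
  | [], acc => some acc
  | s :: rest, acc =>
    match addEntry (levelA s.toList ind 0 0)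
        (PySem.Chars.lower (PySem.Chars.strip s.toList)) s.toList acc with
    | none => none
    | some acc' => buildA ind rest acc'

def indented_list_sort (indented_list : List String) (indent : String) : List String :=
  match buildA indent.toList indented_list .nil with
  | none => []  -- Python raises IndexError on these inputs; excluded by Pre_
  | some entries => (emitAll (sortNodes (nlNodes entries))).map (fun cs => String.ofList cs)

-- ===== PORT B =====
-- The Python stack of aliased children-lists is rendered functionally as a spine of OPEN
-- frames `(key, item, children-so-far)` along the rightmost path (shallowest first);
-- `del stack[level+1:]` = close the dropped frames and attach them, then push a new frame.

/-- B's indent counter: `while indent and rest.startswith(indent): rest = rest[len(indent):]` -/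
def levelB (ind rest : List Char) : Nat :=
  if h : ind ≠ [] ∧ PySem.Chars.startswith rest ind = true then
    levelB ind (rest.drop ind.length) + 1
  else 0
termination_by rest.length
decreasing_by
  have hp := (PySem.Chars.startswith_iff _ _).mp h.2
  have h1 := hp.length_le
  have h2 : ind.length ≠ 0 := by simpa using h.1
  simp [List.length_drop]
  omega

/-- close an open frame together with the chain of deeper open frames into one entry -/
def closeChain : (List Char × List Char × List Node) → List (List Char × List Char × List Node) → Node
  | (k, it, ch), [] => .mk k it (ofList ch)
  | (k, it, ch), g :: rest => .mk k it ((ofList ch).snoc (closeChain g rest))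

/-- the nodes a dropped stack suffix closes into (none if nothing was dropped) -/
def closePost : List (List Char × List Char × List Node) → List Node
  | [] => []
  | g :: rest => [closeChain g rest]

/-- `stack[level].append(…)` for level ≥ 1: append to the children of the DEEPEST kept frame -/
def attachLast : List (List Char × List Char × List Node) → List Node → List (List Char × List Char × List Node)
  | [], _ => []
  | [(k, it, ch)], ns => [(k, it, ch ++ ns)]
  | f :: g :: rest, ns => f :: attachLast (g :: rest) ns

/-- one loop iteration of B: truncate the stack to `level+1` entries (closing what is
    dropped), attach the new node at `stack[level]`, push its children list -/
def stepB (roots : List Node) (spine : List (List Char × List Char × List Node))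
    (lvl : Nat) (k it : List Char) : List Node × List (List Char × List Char × List Node) :=
  if lvl ≤ spine.length then
    let post := closePost (spine.drop lvl)
    if lvl = 0 then (roots ++ post, [(k, it, ([] : List Node))])
    else (roots, attachLast (spine.take lvl) post ++ [(k, it, ([] : List Node))])
  else (roots, spine)  -- Python raises IndexError here; excluded by Pre_

/-- at the end of the loop the whole stack closes into the entries list -/
def closeAll (roots : List Node) (spine : List (List Char × List Char × List Node)) : NodeList :=
  match spine with
  | [] => ofList roots
  | f :: rest => (ofList roots).snoc (closeChain f rest)

def indented_list_sort_alt (indented_list : List String) (indent : String) : List String :=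
  let st := indented_list.foldl
    (fun st s => stepB st.1 st.2 (levelB indent.toList s.toList)
      (PySem.Chars.lower (PySem.Chars.strip s.toList)) s.toList)
    (([] : List Node), ([] : List (List Char × List Char × List Node)))
  (emitAll (sortNodes (nlNodes (closeAll st.1 st.2)))).map (fun cs => String.ofList cs)

-- ===== PRECONDITION & SPEC =====

/-- the indent level of a line: the largest m ≤ len(s) such that `indent` repeated m times
    is a prefix of s (closed form; for the admitted `ind ≠ []` this is the greedy count) -/
def levelOf (ind s : List Char) : Nat :=
  ((List.range (s.length + 1)).filter
    (fun m => (List.replicate m ind).flatten.isPrefixOf s)).foldr max 0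

def lineLevels (ind : List Char) (l : List String) : List Nat :=
  l.map (fun s => levelOf ind s.toList)

-- Pre_ excludes exactly the inputs where Python A returns no value: indent = "" makes A's
-- startswith loop run forever, and a line indented more than one level deeper than its
-- predecessor makes add_entry raise IndexError on an empty children list.
def Pre_indented_list_sort (indented_list : List String) (indent : String) : Prop :=
  indent ≠ "" ∧ (lineLevels indent.toList indented_list).headD 0 = 0 ∧
    List.IsChain (fun a b => b ≤ a + 1) (lineLevels indent.toList indented_list)
instance (indented_list : List String) (indent : String) : Decidable (Pre_indented_list_sort indented_list indent) := by
  unfold Pre_indented_list_sort; infer_instance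

def pvWitness_indented_list_sort : List String × String :=
  (["M", " MX", " MG", "D", " DF", "  DFX", " DC", "A"], " ")

def Spec_indented_list_sort (indented_list : List String) (indent : String) (out : List String) : Prop := out = indented_list_sort_alt indented_list indent
instance (indented_list : List String) (indent : String) (out : List String) : Decidable (Spec_indented_list_sort indented_list indent out) := by unfold Spec_indented_list_sort; infer_instance

-- ===== CLAIM (what is proved, stated in full; the proofs are below) =====
def Claim_equal_indented_list_sort : Prop := ∀ (indented_list : List String) (indent : String), Dom_indented_list_sort indented_list indent → Pre_indented_list_sort indented_list indent → Spec_indented_list_sort indented_list indent (indented_list_sort indented_list indent)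

-- ===== LEMMAS AND PROOFS =====

/-- greedy indent counter (the shape both ports' while loops compute) -/
def levelG (ind s : List Char) : Nat :=
  if h : ind ≠ [] ∧ ind <+: s then levelG ind (s.drop ind.length) + 1 else 0
termination_by s.length
decreasing_by
  have h1 := h.2.length_le
  have h2 : ind.length ≠ 0 := by simpa using h.1
  simp [List.length_drop]
  omega

/-- each line's indent level is at most one more than the previous line's -/
def levelsOk (ind : List Char) (cap : Nat) : List String → Bool
  | [] => true
  | s :: rest => levelG ind s.toList ≤ cap && levelsOk ind (levelG ind s.toList + 1) rest

lemma levelG_pos {ind s : List Char} (h1 : ind ≠ []) (h2 : ind <+: s) :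
    levelG ind s = levelG ind (s.drop ind.length) + 1 := by
  rw [levelG, dif_pos ⟨h1, h2⟩]

lemma levelG_neg {ind s : List Char} (h : ¬(ind ≠ [] ∧ ind <+: s)) :
    levelG ind s = 0 := by
  rw [levelG, dif_neg h]

lemma levelA_eq (s ind : List Char) (i lvl : Nat) :
    levelA s ind i lvl = lvl + levelG ind (s.drop i) := by
  fun_induction levelA s ind i lvl with
  | case1 i lvl h ih =>
    rw [ih, levelG_pos h.1 ((PySem.Chars.startswith_iff _ _).mp h.2),
      List.drop_drop]
    omega
  | case2 i lvl h =>
    rw [PySem.Chars.startswith_iff] at h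
    rw [levelG_neg h]
    omega

lemma levelB_eq (ind s : List Char) : levelB ind s = levelG ind s := by
  fun_induction levelB ind s with
  | case1 rest h ih =>
    rw [ih, levelG_pos h.1 ((PySem.Chars.startswith_iff _ _).mp h.2)]
  | case2 rest h =>
    rw [PySem.Chars.startswith_iff] at h
    rw [levelG_neg h]

lemma ofList_append_singleton (l : List Node) (n : Node) :
    ofList (l ++ [n]) = (ofList l).snoc n := by
  induction l with
  | nil => rfl
  | cons m l ih => simp [ofList, NodeList.snoc] at *; rw [ih]

/-- A's `add_entry` applied to one entry (descend into its children) -/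
def addEntryNode (l : Nat) (k it : List Char) : Node → Option Node
  | .mk k' it' ch => (addEntry l k it ch).map (.mk k' it')

lemma addEntry_pos_snoc (l : Nat) (k it : List Char) :
    ∀ (ns : NodeList) (n : Node),
    addEntry (l + 1) k it (ns.snoc n) = (addEntryNode l k it n).map ns.snoc := by
  intro ns
  induction ns using nlNodes.induct with
  | case1 =>
    intro n
    obtain ⟨k', it', ch⟩ := n
    simp [NodeList.snoc, addEntry, addEntryNode, Option.map_map]
    rfl
  | case2 m r ih =>
    intro n
    cases r with
    | nil =>
      obtain ⟨k', it', ch⟩ := n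
      simp [NodeList.snoc, addEntry, addEntryNode, Option.map_map]
      rfl
    | cons a b =>
      have h : (NodeList.cons m (NodeList.cons a b)).snoc n
          = NodeList.cons m ((NodeList.cons a b).snoc n) := rfl
      rw [h]
      have h2 : (NodeList.cons a b).snoc n = NodeList.cons a (b.snoc n) := rfl
      rw [h2]
      have h3 : addEntry (l + 1) k it (NodeList.cons m (NodeList.cons a (b.snoc n)))
          = (addEntry (l + 1) k it (NodeList.cons a (b.snoc n))).map (NodeList.cons m) := by
        simp [addEntry]
      rw [h3, ← h2, ih n, Option.map_map]
      rfl

/-- the entry the updated chain closes into -/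
def chainResult (k it : List Char) : Nat → (List Char × List Char × List Node) → List (List Char × List Char × List Node) → Node
  | 0, (kf, itf, ch), rest => closeChain (kf, itf, ch ++ closePost rest) [(k, it, [])]
  | _ + 1, f, [] => closeChain f []   -- unreachable under l + 1 ≤ rest.length
  | l + 1, (kf, itf, ch), g :: rest2 => .mk kf itf ((ofList ch).snoc (chainResult k it l g rest2))

lemma addEntryNode_chain (k it : List Char) : ∀ (l : Nat) (f : List Char × List Char × List Node)
    (rest : List (List Char × List Char × List Node)), l ≤ rest.length →
    addEntryNode l k it (closeChain f rest) = some (chainResult k it l f rest) := by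
  intro l
  induction l with
  | zero =>
    intro f rest _
    obtain ⟨kf, itf, ch⟩ := f
    cases rest with
    | nil => simp [closeChain, addEntryNode, addEntry, chainResult, closePost, ofList]
    | cons g r2 =>
      simp [closeChain, addEntryNode, addEntry, chainResult, closePost,
        ofList_append_singleton]
      rfl
  | succ l ih =>
    intro f rest h
    cases rest with
    | nil => simp at h
    | cons g r2 =>
      obtain ⟨kf, itf, ch⟩ := f
      have hl : l ≤ r2.length := by simpa using h
      have e1 : addEntryNode (l + 1) k it (closeChain (kf, itf, ch) (g :: r2))
          = (addEntry (l + 1) k it ((ofList ch).snoc (closeChain g r2))).map (Node.mk kf itf) := rfl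
      rw [e1, addEntry_pos_snoc l k it (ofList ch) (closeChain g r2), ih g r2 hl]
      rfl

lemma closePost_newChain (k it : List Char) : ∀ (l : Nat) (f : List Char × List Char × List Node)
    (rest : List (List Char × List Char × List Node)), l ≤ rest.length →
    closePost (attachLast (f :: rest.take l) (closePost (rest.drop l)) ++ [(k, it, [])])
      = [chainResult k it l f rest] := by
  intro l
  induction l with
  | zero =>
    intro f rest _
    obtain ⟨kf, itf, ch⟩ := f
    simp [attachLast, closePost, chainResult]
  | succ l ih =>
    intro f rest h
    cases rest with
    | nil => simp at h
    | cons g r2 =>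
      obtain ⟨kf, itf, ch⟩ := f
      have hl : l ≤ r2.length := by simpa using h
      have ih2 := ih g r2 hl
      simp only [List.take_succ_cons, List.drop_succ_cons]
      have e : attachLast ((kf, itf, ch) :: g :: r2.take l) (closePost (r2.drop l))
          = (kf, itf, ch) :: attachLast (g :: r2.take l) (closePost (r2.drop l)) := rfl
      rw [e]
      rw [List.cons_append]
      cases hMc : attachLast (g :: r2.take l) (closePost (r2.drop l)) ++ [(k, it, ([] : List Node))] with
      | nil => rw [hMc] at ih2; simp [closePost] at ih2
      | cons m mr =>
        rw [hMc] at ih2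
        simp only [closePost, List.cons.injEq, and_true] at ih2
        simp only [closePost, closeChain, chainResult, ih2]


lemma attachLast_length (ns : List Node) : ∀ xs, (attachLast xs ns).length = xs.length := by
  intro xs
  induction xs with
  | nil => rfl
  | cons f rest ih =>
    cases rest with
    | nil => obtain ⟨a, b, c⟩ := f; rfl
    | cons g r =>
      have e : attachLast (f :: g :: r) ns = f :: attachLast (g :: r) ns := rfl
      rw [e, List.length_cons, List.length_cons, ih]

lemma stepB_length (roots : List Node) (spine : List (List Char × List Char × List Node))
    (lvl : Nat) (k it : List Char) (h : lvl ≤ spine.length) :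
    (stepB roots spine lvl k it).2.length = lvl + 1 := by
  unfold stepB
  rw [if_pos h]
  by_cases h0 : lvl = 0
  · subst h0; simp
  · simp [h0, attachLast_length, List.length_take]
    omega

lemma step_correct (k it : List Char) (roots : List Node)
    (spine : List (List Char × List Char × List Node)) (lvl : Nat) (h : lvl ≤ spine.length) :
    addEntry lvl k it (closeAll roots spine)
      = some (closeAll (stepB roots spine lvl k it).1 (stepB roots spine lvl k it).2) := by
  cases lvl with
  | zero =>
    cases spine with
    | nil => simp [stepB, closeAll, closePost, addEntry, closeChain, ofList]
    | cons f rest =>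
      simp [stepB, closeAll, closePost, addEntry, closeChain, ofList_append_singleton]
      rfl
  | succ l =>
    cases spine with
    | nil => simp at h
    | cons f rest =>
      have hl : l ≤ rest.length := by simpa using h
      have e1 : closeAll roots (f :: rest) = (ofList roots).snoc (closeChain f rest) := rfl
      rw [e1, addEntry_pos_snoc l k it (ofList roots) (closeChain f rest),
        addEntryNode_chain k it l f rest hl]
      have e2 : stepB roots (f :: rest) (l + 1) k it
          = (roots, attachLast (f :: rest.take l) (closePost (rest.drop l)) ++ [(k, it, ([] : List Node))]) := by
        unfold stepB
        rw [if_pos h]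
        simp [List.take_succ_cons, List.drop_succ_cons]
      rw [e2]
      have hcp := closePost_newChain k it l f rest hl
      cases hMc : attachLast (f :: rest.take l) (closePost (rest.drop l)) ++ [(k, it, ([] : List Node))] with
      | nil => rw [hMc] at hcp; simp [closePost] at hcp
      | cons m mr =>
        rw [hMc] at hcp
        simp only [closePost, List.cons.injEq, and_true] at hcp
        simp [closeAll, hcp]

lemma build_eq (ind : List Char) : ∀ (items : List String) (roots : List Node)
    (spine : List (List Char × List Char × List Node)),
    levelsOk ind spine.length items = true →
    buildA ind items (closeAll roots spine)
      = some (closeAll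
          (items.foldl (fun st s => stepB st.1 st.2 (levelB ind s.toList)
            (PySem.Chars.lower (PySem.Chars.strip s.toList)) s.toList) (roots, spine)).1
          (items.foldl (fun st s => stepB st.1 st.2 (levelB ind s.toList)
            (PySem.Chars.lower (PySem.Chars.strip s.toList)) s.toList) (roots, spine)).2) := by
  intro items
  induction items with
  | nil => intro roots spine _; rfl
  | cons s rest ih =>
    intro roots spine hok
    simp only [levelsOk, Bool.and_eq_true, decide_eq_true_eq] at hok
    obtain ⟨h1, h2⟩ := hok
    simp only [levelB_eq] at ih ⊢
    have hnext : levelsOk ind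
        (stepB roots spine (levelG ind s.toList)
          (PySem.Chars.lower (PySem.Chars.strip s.toList)) s.toList).2.length rest = true := by
      rw [stepB_length _ _ _ _ _ h1]
      simpa [levelsOk] using h2
    simp only [buildA, List.foldl_cons]
    rw [levelA_eq]
    simp only [List.drop_zero, Nat.zero_add]
    rw [step_correct (PySem.Chars.lower (PySem.Chars.strip s.toList)) s.toList roots spine _ h1]
    exact ih _ _ hnext


lemma prefix_levelG {ind : List Char} :
    ∀ s : List Char, (List.replicate (levelG ind s) ind).flatten <+: s := by
  intro s
  fun_induction levelG ind s with
  | case1 s h ih =>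
    obtain ⟨u, hu⟩ := h.2
    subst hu
    rw [List.drop_left] at ih
    obtain ⟨w, hw⟩ := ih
    exact ⟨w, by simp [List.replicate_succ, hw]⟩
  | case2 s h => simp

lemma le_levelG {ind : List Char} (hind : ind ≠ []) :
    ∀ (m : Nat) (s : List Char), (List.replicate m ind).flatten <+: s → m ≤ levelG ind s := by
  intro m
  induction m with
  | zero => intro s _; omega
  | succ m ih =>
    intro s hp
    rw [List.replicate_succ, List.flatten_cons] at hp
    have hpre : ind <+: s := (ind.prefix_append _).trans hp
    obtain ⟨u, hu⟩ := hpre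
    subst hu
    have hp2 : (List.replicate m ind).flatten <+: u :=
      (List.prefix_append_right_inj ind).mp hp
    have h1 := ih u hp2
    have h2 : levelG ind (ind ++ u) = levelG ind u + 1 := by
      rw [levelG_pos hind ⟨u, rfl⟩, List.drop_left]
    omega

lemma levelG_le_length {ind s : List Char} (hind : ind ≠ []) : levelG ind s ≤ s.length := by
  have h1 := (prefix_levelG (ind := ind) s).length_le
  simp only [List.length_flatten, List.map_replicate, List.sum_replicate, smul_eq_mul] at h1
  have h2 : ind.length ≠ 0 := by simpa using hind
  have h3 : levelG ind s ≤ levelG ind s * ind.length :=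
    Nat.le_mul_of_pos_right _ (by omega)
  omega

lemma foldr_max_le {m : Nat} : ∀ L : List Nat, (∀ x ∈ L, x ≤ m) → L.foldr max 0 ≤ m := by
  intro L
  induction L with
  | nil => intro _; simp
  | cons a t ih =>
    intro h
    have h1 := ih (fun x hx => h x (by simp [hx]))
    have h2 := h a (by simp)
    simp only [List.foldr_cons]
    exact Nat.max_le.mpr ⟨h2, h1⟩

lemma foldr_max_eq {m : Nat} : ∀ L : List Nat, m ∈ L → (∀ x ∈ L, x ≤ m) → L.foldr max 0 = m := by
  intro L
  induction L with
  | nil => intro hm; simp at hm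
  | cons a t ih =>
    intro hm hb
    simp only [List.foldr_cons]
    rcases List.mem_cons.mp hm with rfl | hmt
    · exact Nat.max_eq_left (foldr_max_le t (fun x hx => hb x (by simp [hx])))
    · rw [ih hmt (fun x hx => hb x (by simp [hx]))]
      exact Nat.max_eq_right (hb a (by simp))

lemma levelOf_eq_levelG {ind s : List Char} (hind : ind ≠ []) :
    levelOf ind s = levelG ind s := by
  unfold levelOf
  apply foldr_max_eq
  · refine List.mem_filter.mpr ⟨List.mem_range.mpr ?_, ?_⟩
    · have := levelG_le_length (s := s) hind; omega
    · simpa [List.isPrefixOf_iff_prefix] using prefix_levelG (ind := ind) s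
  · intro x hx
    obtain ⟨_, hxp⟩ := List.mem_filter.mp hx
    exact le_levelG hind x s (by simpa [List.isPrefixOf_iff_prefix] using hxp)

lemma chain_levelsOk {ind : List Char} :
    ∀ (l : List String) (cap : Nat),
      (l.map (fun s => levelG ind s.toList)).headD 0 ≤ cap →
      List.IsChain (fun a b => b ≤ a + 1) (l.map (fun s => levelG ind s.toList)) →
      levelsOk ind cap l = true := by
  intro l
  induction l with
  | nil => intro cap _ _; rfl
  | cons s rest ih =>
    intro cap h1 h2
    simp only [List.map_cons, List.headD_cons] at h1
    simp only [levelsOk, Bool.and_eq_true, decide_eq_true_eq]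
    simp only [List.map_cons] at h2
    refine ⟨h1, ih _ ?_ h2.of_cons⟩
    cases rest with
    | nil => simp
    | cons s2 r2 =>
      simp only [List.map_cons] at h2 ⊢
      simpa using h2.rel

-- ===== VERDICT (by name: the statement is the Claim_ definition above) =====
theorem indented_list_sort_spec : Claim_equal_indented_list_sort := by
  intro l ind _ hpre
  obtain ⟨hne, hhead, hchain⟩ := hpre
  have hind : ind.toList ≠ [] := fun hh =>
    hne (by simpa using congrArg String.ofList (hh ▸ rfl : ind.toList = []))
  have hmapeq : lineLevels ind.toList l = l.map (fun s => levelG ind.toList s.toList) := by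
    unfold lineLevels
    exact List.map_congr_left (fun s _ => levelOf_eq_levelG hind)
  rw [hmapeq] at hhead hchain
  have hok : levelsOk ind.toList 0 l = true :=
    chain_levelsOk l 0 (le_of_eq hhead) hchain
  unfold Spec_indented_list_sort indented_list_sort indented_list_sort_alt
  have h0 : closeAll [] [] = NodeList.nil := rfl
  have := build_eq ind.toList l [] [] (by simpa using hok)
  rw [h0] at this
  rw [this]
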